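-- pv_equiv track=rewrite | github.com/lfhohmann/expression-solver | expression_solver.py | __join_numbers_to_operators
-- ===== SOURCE A (Python) =====
-- def __join_numbers_to_operators(expression: list) -> list:
--     """
--     Join operators to numbers
--     --------------
--
--     Joins "+" and "-" operators to their following numbers.
--
--     Parameters
--     ----------
--
--     #### expression : list (required)
--     List containing the elements of the expression
--
--     >>> ["123", "-", "321"] -> ["123", "-321"]
--     >>> ["12", "+", "3", "*", "+", "2"] -> ["12", "+3", "*", "+2"]
--
--     Returns
--     -------
--
--     #### list:
--     A list containing the elements of the expression with the joined
--     operators to numbers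
--
--     >>> ["123", "-321"]
--     >>> ["12", "+3", "*", "+2"]
--     """
--
--     # Init index
--     i = 1
--
--     # Loop through the expression while there are "+" and/or "-" operators
--     while "+" in expression or "-" in expression:
--
--         # Check if previous element is a "+" or "-" operator
--         if expression[i - 1] in "+-":
--
--             # If so, join the operator to the current number element, and pop current element
--             expression[i - 1] += expression[i]
--             expression.pop(i)
--
--         # Go to next element
--         i += 1
--
--     # Return the expression
--     return expression
-- ===== SOURCE B (Python) =====
-- def __join_numbers_to_operators(expression: list) -> list:
--     """Single forward pass: each "+" or "-" token is merged with the token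
--     following it; every other token is copied through.  Returns a NEW list
--     (the original A mutates its argument in place; the equivalence claimed
--     is about the return value only)."""
--     result = []
--     i = 0
--     n = len(expression)
--     while i < n:
--         token = expression[i]
--         if token == "+" or token == "-":
--             result.append(token + expression[i + 1])
--             i += 2
--         else:
--             result.append(token)
--             i += 1
--     return result
-- ===== Notes on version B (the rewrite author's own statement) =====
-- stated objective: simpler
-- what changed: A repeatedly rescans the whole list for '+'/'-' membership and merges by mutating and popping in place; B is a single forward pass that builds a new result list, merging each '+'/'-' token with its successor.
-- outside the precondition, e.g. on __join_numbers_to_operators(['', '1', '+', '2']): A returns ['1', '+2'], B returns ['', '1', '+2']; on __join_numbers_to_operators(['+-', '+', '1']): A returns ['+-+', '1'], B returns ['+-', '+1']; on __join_numbers_to_operators(['1', '+', '']): A raises IndexError, B returns ['1', '+']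
import Mathlib
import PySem

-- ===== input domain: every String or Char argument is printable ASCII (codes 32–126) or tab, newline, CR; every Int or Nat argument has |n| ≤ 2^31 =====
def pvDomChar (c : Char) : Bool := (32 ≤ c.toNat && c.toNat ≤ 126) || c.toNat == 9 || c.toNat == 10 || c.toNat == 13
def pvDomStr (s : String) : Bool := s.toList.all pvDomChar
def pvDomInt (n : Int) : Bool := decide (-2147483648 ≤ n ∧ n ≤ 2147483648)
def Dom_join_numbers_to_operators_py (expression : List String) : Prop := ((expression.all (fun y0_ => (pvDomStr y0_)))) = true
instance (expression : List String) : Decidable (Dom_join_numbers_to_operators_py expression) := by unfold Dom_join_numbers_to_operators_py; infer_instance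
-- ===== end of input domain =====

-- B replaces A's repeated whole-list membership rescans and in-place pops by a single forward
-- pass building a new list; the equivalence is about the RETURN value only (A mutates its
-- argument in place, B does not).

-- ===== PORT A =====
-- `expression[i - 1] in "+-"` is Python's SUBSTRING test, ported exactly as PySem.Str.isIn.
-- i starts at 1 and only grows, so the indices i-1 and i are never negative: expression[i-1] /
-- expression[i] are ported as getElem? (none = IndexError, where Python A raises; the port
-- returns [] there — such inputs are outside Pre_).  `expression.pop(i)` is eraseIdx i, exact
-- here because reading expression[i] has just succeeded, so i is in range and pop cannot raise.
def joinLoopA (expr : List String) (i : Nat) : List String :=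
  if (expr.contains "+" || expr.contains "-") = false then expr
  else
    match h1 : expr[i - 1]? with
    | none => []            -- IndexError: outside Pre_
    | some prev =>
      if PySem.Str.isIn prev "+-" then
        match h2 : expr[i]? with
        | none => []        -- IndexError: outside Pre_
        | some cur => joinLoopA ((expr.set (i - 1) (prev ++ cur)).eraseIdx i) (i + 1)
      else joinLoopA expr (i + 1)
termination_by expr.length + 1 - i
decreasing_by
  · have hi : i < expr.length := (List.getElem?_eq_some_iff.mp h2).1
    simp [List.length_eraseIdx, List.length_set, hi]
    omega
  · have hi1 : i - 1 < expr.length := (List.getElem?_eq_some_iff.mp h1).1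
    omega

def join_numbers_to_operators_py (expression : List String) : List String :=
  joinLoopA expression 1

-- ===== PORT B =====
def joinB : List String → List String
  | [] => []
  | t :: rest =>
    if t = "+" ∨ t = "-" then
      match rest with
      | [] => []            -- Source B: expression[i + 1] raises IndexError: outside Pre_
      | x :: rest' => (t ++ x) :: joinB rest'
    else t :: joinB rest

def join_numbers_to_operators_py_alt (expression : List String) : List String :=
  joinB expression

-- ===== PRECONDITION & SPEC =====
def isOpTok (t : String) : Bool := t == "+" || t == "-"

-- Pre_ excludes (a) expressions ending in an odd-length run of "+"/"-" tokens and expressions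
-- in which an "" token directly follows an odd-length run of "+"/"-" tokens — there A raises
-- IndexError — and (b) expressions in which an "" or "+-" token occurs before some "+"/"-"
-- token: there A's substring test `expression[i - 1] in "+-"` accidentally treats "" and "+-"
-- as operators and merges them into their successors (or raises), a corner that cannot be
-- separated from the raising cases in closed form.
def Pre_join_numbers_to_operators_py (expression : List String) : Prop :=
  (expression.reverse.takeWhile isOpTok).length % 2 = 0 ∧
  expression.Pairwise (fun a b => (a = "" ∨ a = "+-") → isOpTok b = false) ∧
  ∀ i, (h : i < expression.length) → expression[i] = "" →
    ((expression.take i).reverse.takeWhile isOpTok).length % 2 = 0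

instance (expression : List String) : Decidable (Pre_join_numbers_to_operators_py expression) := by
  unfold Pre_join_numbers_to_operators_py; infer_instance

def pvWitness_join_numbers_to_operators_py : List String := ["12", "+", "3", "*", "+", "2"]

def Spec_join_numbers_to_operators_py (expression : List String) (out : List String) : Prop := out = join_numbers_to_operators_py_alt expression
instance (expression : List String) (out : List String) : Decidable (Spec_join_numbers_to_operators_py expression out) := by unfold Spec_join_numbers_to_operators_py; infer_instance

-- ===== CLAIM (what is proved, stated in full; the proofs are below) =====
def Claim_equal_join_numbers_to_operators_py : Prop := ∀ (expression : List String), Dom_join_numbers_to_operators_py expression → Pre_join_numbers_to_operators_py expression → Spec_join_numbers_to_operators_py expression (join_numbers_to_operators_py expression)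

-- ===== LEMMAS AND PROOFS =====

theorem isOpTok_iff (t : String) : isOpTok t = true ↔ (t = "+" ∨ t = "-") := by
  simp [isOpTok]

theorem joinB_cons_nonop (t : String) (r : List String) (h : ¬(t = "+" ∨ t = "-")) :
    joinB (t :: r) = t :: joinB r := by
  rw [joinB.eq_def]; simp [h]

theorem joinB_cons_op (t x : String) (r : List String) (h : t = "+" ∨ t = "-") :
    joinB (t :: x :: r) = (t ++ x) :: joinB r := by
  rw [joinB.eq_def]; simp [h]

-- B is the identity on operator-free lists
theorem joinB_id (r : List String) (hp : "+" ∉ r) (hm : "-" ∉ r) : joinB r = r := by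
  induction r with
  | nil => rfl
  | cons t r ih =>
    simp only [List.mem_cons, not_or] at hp hm
    rw [joinB_cons_nonop t r (by tauto), ih hp.2 hm.2]

theorem infix_pm (l : List Char) (h : l <:+: ['+','-']) :
    l = [] ∨ l = ['+'] ∨ l = ['-'] ∨ l = ['+','-'] := by
  obtain ⟨s, u, hsu⟩ := h
  rcases s with _ | ⟨a, _ | ⟨b, s⟩⟩ <;> rcases l with _ | ⟨c, _ | ⟨d, _ | ⟨e, l⟩⟩⟩ <;> simp_all

-- Python's substring test `t in "+-"` holds exactly for the four substrings of "+-"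
theorem isInPM_iff (t : String) :
    PySem.Str.isIn t "+-" = true ↔ (t = "" ∨ t = "+" ∨ t = "-" ∨ t = "+-") := by
  rw [PySem.Str.isIn_iff_infix]
  constructor
  · intro h
    have h0 : ("+-" : String).toList = ['+', '-'] := by decide
    rw [h0] at h
    rcases infix_pm _ h with h2 | h2 | h2 | h2
    · exact Or.inl (by have := congrArg String.ofList h2; simpa using this)
    · exact Or.inr (Or.inl (by have := congrArg String.ofList h2; simpa using this))
    · exact Or.inr (Or.inr (Or.inl (by have := congrArg String.ofList h2; simpa using this)))
    · exact Or.inr (Or.inr (Or.inr (by have := congrArg String.ofList h2; simpa using this)))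
  · rintro (rfl | rfl | rfl | rfl) <;> decide

-- appending one non-operator token does not change the operator-run length
theorem takeWhile_append_nonop (u : List String) (t : String) (ht : isOpTok t = false) :
    ((u ++ [t]).takeWhile isOpTok).length = (u.takeWhile isOpTok).length := by
  rw [List.takeWhile_append]
  split_ifs with h
  · have hu : u.takeWhile isOpTok = u := (List.takeWhile_sublist _).eq_of_length h
    simp [ht, hu]
  · rfl

-- appending [x, t] with t an operator preserves the PARITY of the operator-run length
theorem takeWhile_append_two (u : List String) (x t : String) (ht : isOpTok t = true) :
    ((u ++ [x, t]).takeWhile isOpTok).length % 2 = (u.takeWhile isOpTok).length % 2 := by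
  rw [List.takeWhile_append]
  split_ifs with h
  · have hu : u.takeWhile isOpTok = u := (List.takeWhile_sublist _).eq_of_length h
    by_cases hx : isOpTok x = true
    · simp [hx, ht, hu]
    · simp [hx, hu]
  · rfl

-- an operator merged with a nonempty token is no longer an operator token
theorem append_ne_ops (t x : String) (ht : t = "+" ∨ t = "-") (hx : x ≠ "") :
    isOpTok (t ++ x) = false := by
  have hxl : x.toList ≠ [] := fun h => hx (by have := congrArg String.ofList h; simpa using this)
  simp only [isOpTok, Bool.or_eq_false_iff, beq_eq_false_iff_ne, ne_eq]
  constructor <;> intro h <;>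
    rcases ht with rfl | rfl <;>
    · have := congrArg String.toList h
      rw [String.toList_append] at this
      simp_all

theorem eraseIdx_mid (d : List String) (y : String) (ys : List String) :
    (d ++ y :: ys).eraseIdx (d.length + 1) = d ++ y :: ys.tail := by
  induction d with
  | nil => cases ys <;> simp
  | cons a d ih => simpa using ih

-- main invariant: A's loop over done ++ rest with the pointer at the head of rest acts as
-- B's single pass on rest, provided done is operator-free and rest satisfies Pre_'s shape
theorem loopA_eq (n : Nat) (rest done : List String) (hn : rest.length ≤ n)
    (hdp : "+" ∉ done) (hdm : "-" ∉ done)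
    (hrun : (rest.reverse.takeWhile isOpTok).length % 2 = 0)
    (hpw : rest.Pairwise (fun a b => (a = "" ∨ a = "+-") → isOpTok b = false))
    (hemp : ∀ i, (h : i < rest.length) → rest[i] = "" →
      ((rest.take i).reverse.takeWhile isOpTok).length % 2 = 0) :
    joinLoopA (done ++ rest) (done.length + 1) = done ++ joinB rest := by
  induction n generalizing rest done with
  | zero =>
    have : rest = [] := List.length_eq_zero_iff.mp (Nat.le_zero.mp hn)
    subst this
    rw [joinLoopA]
    rw [if_pos (by simp [List.contains_eq_mem]; tauto)]
    simp [joinB]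
  | succ n ih =>
    rw [joinLoopA]
    by_cases hc : (((done ++ rest).contains "+" || (done ++ rest).contains "-") = false)
    · rw [if_pos hc]
      simp only [List.contains_eq_mem, List.mem_append, Bool.or_eq_false_iff,
        decide_eq_false_iff_not, not_or] at hc
      rw [joinB_id rest hc.1.2 hc.2.2]
    · rw [if_neg hc]
      simp only [List.contains_eq_mem, List.mem_append, Bool.or_eq_false_iff,
        decide_eq_false_iff_not, not_or, not_and, not_not] at hc
      -- an operator occurs in done ++ rest, hence in rest
      have hop : "+" ∈ rest ∨ "-" ∈ rest := by tauto
      match rest with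
      | [] => simp at hop
      | t :: r =>
        have hidx : (done ++ t :: r)[done.length + 1 - 1]? = some t := by simp
        split
        case h_1 h1 => rw [hidx] at h1; cases h1
        case h_2 prev h1 =>
        rw [hidx] at h1; injection h1 with h1; subst h1
        by_cases hto : t = "+" ∨ t = "-"
        · -- t is an operator
          rw [if_pos (isInPM_iff t |>.mpr (by tauto))]
          match r with
          | [] =>
            -- the trailing operator run of [t] has odd length: contradiction with hrun
            exfalso
            have : isOpTok t = true := (isOpTok_iff t).mpr hto
            simp [this] at hrun
          | x :: r' =>
            have hx : x ≠ "" := by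
              intro hxe
              have := hemp 1 (by simp) (by simpa using hxe)
              simp [(isOpTok_iff t).mpr hto] at this
            have hidx2 : (done ++ t :: x :: r')[done.length + 1]? = some x := by simp
            split
            case h_1 h2 => rw [hidx2] at h2; cases h2
            case h_2 cur h2 =>
            rw [hidx2] at h2; injection h2 with h2; subst h2
            have hset : ((done ++ t :: x :: r').set (done.length + 1 - 1) (t ++ x)).eraseIdx (done.length + 1)
                = (done ++ [t ++ x]) ++ r' := by
              have h1 : (done ++ t :: x :: r').set done.length (t ++ x) = done ++ (t ++ x) :: x :: r' := by
                simp
              simp only [Nat.add_sub_cancel, h1]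
              rw [eraseIdx_mid]
              simp
            rw [hset]
            have hne : isOpTok (t ++ x) = false := append_ne_ops t x hto hx
            have hlen : (done ++ [t ++ x]).length = done.length + 1 := by simp
            have := ih r' (done ++ [t ++ x])
              (by simp at hn ⊢; omega)
              (by simp only [List.mem_append, List.mem_singleton, not_or]
                  exact ⟨hdp, fun h => by simp [isOpTok, ← h] at hne⟩)
              (by simp only [List.mem_append, List.mem_singleton, not_or]
                  exact ⟨hdm, fun h => by simp [isOpTok, ← h] at hne⟩)
              (by
                have : (t :: x :: r').reverse = r'.reverse ++ [x, t] := by simp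
                rw [this] at hrun
                rw [← takeWhile_append_two r'.reverse x t ((isOpTok_iff t).mpr hto)]
                exact hrun)
              ((List.pairwise_cons.mp (List.pairwise_cons.mp hpw).2).2)
              (by
                intro j hj hje
                have hj2 : j + 2 < (t :: x :: r').length := by simpa using Nat.add_lt_add_right hj 2
                have := hemp (j + 2) hj2 (by simpa using hje)
                have htk : ((t :: x :: r').take (j + 2)).reverse = (r'.take j).reverse ++ [x, t] := by
                  simp
                rw [htk] at this
                rw [← takeWhile_append_two (r'.take j).reverse x t ((isOpTok_iff t).mpr hto)]
                exact this)
            rw [hlen] at this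
            rw [this, joinB_cons_op t x r' hto]
            simp
        · -- t is not an operator; Pairwise forbids it to be "" or "+-" (an operator follows)
          have hopr : "+" ∈ r ∨ "-" ∈ r := by
            rcases hop with h | h <;> simp only [List.mem_cons] at h <;> tauto
          have hnw : ¬(t = "" ∨ t = "+-") := by
            intro hw
            have hall := (List.pairwise_cons.mp hpw).1
            rcases hopr with h | h
            · have := hall _ h hw; simp [isOpTok] at this
            · have := hall _ h hw; simp [isOpTok] at this
          rw [if_neg (by rw [isInPM_iff]; tauto)]
          have hassoc : done ++ t :: r = (done ++ [t]) ++ r := by simp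
          have hlen : (done ++ [t]).length = done.length + 1 := by simp
          have hto' : isOpTok t = false := by
            simp only [isOpTok, Bool.or_eq_false_iff, beq_eq_false_iff_ne, ne_eq]; tauto
          have := ih r (done ++ [t])
            (by simp at hn ⊢; omega)
            (by simp only [List.mem_append, List.mem_singleton, not_or]
                exact ⟨hdp, fun h => by simp [← h, isOpTok] at hto'⟩)
            (by simp only [List.mem_append, List.mem_singleton, not_or]
                exact ⟨hdm, fun h => by simp [← h, isOpTok] at hto'⟩)
            (by
              have hrev : (t :: r).reverse = r.reverse ++ [t] := by simp
              rw [hrev] at hrun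
              rw [← takeWhile_append_nonop r.reverse t hto']
              exact hrun)
            ((List.pairwise_cons.mp hpw).2)
            (by
              intro j hj hje
              have hj1 : j + 1 < (t :: r).length := by simpa using Nat.add_lt_add_right hj 1
              have := hemp (j + 1) hj1 (by simpa using hje)
              have htk : ((t :: r).take (j + 1)).reverse = (r.take j).reverse ++ [t] := by simp
              rw [htk] at this
              rw [← takeWhile_append_nonop (r.take j).reverse t hto']
              exact this)
          rw [hlen] at this
          rw [← hassoc] at this
          rw [this, joinB_cons_nonop t r hto]
          simp

-- ===== VERDICT (by name: the statement is the Claim_ definition above) =====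
theorem join_numbers_to_operators_py_spec : Claim_equal_join_numbers_to_operators_py := by
  intro expression _hdom hpre
  obtain ⟨h1, h2, h3⟩ := hpre
  unfold Spec_join_numbers_to_operators_py join_numbers_to_operators_py join_numbers_to_operators_py_alt
  have := loopA_eq expression.length expression [] le_rfl (by simp) (by simp) h1 h2 h3
  simpa using this
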